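-- pv_equiv track=rewrite | github.com/MLazarevAX/Course-EPAM-Python-Traning- | functional_programming_top_students/main.py | get_top_student_by_sorted_list
-- ===== SOURCE A (Python) =====
-- def get_top_student_by_sorted_list(result):
--     res = {}
--     for dictionary in result:
--         if dictionary["course"] in res.keys():
--             continue
--         else:
--             res[dictionary["course"]] = dictionary["name"]
--     return res
-- ===== SOURCE B (Python) =====
-- def get_top_student_by_sorted_list(result):
--     res = {}
--     pending = result
--     while pending:
--         top = pending[0]
--         course = top["course"]
--         res[course] = top["name"]
--         pending = [d for d in pending[1:] if d["course"] != course]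
--     return res
-- ===== Notes on version B (the rewrite author's own statement) =====
-- stated objective: alternative
-- what changed: A does a single pass with an 'in res.keys()' membership guard; B has no membership test at all: it repeatedly takes the first pending entry, records its course unconditionally, and filters every later entry with that course out of the remaining work list.
import Mathlib
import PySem

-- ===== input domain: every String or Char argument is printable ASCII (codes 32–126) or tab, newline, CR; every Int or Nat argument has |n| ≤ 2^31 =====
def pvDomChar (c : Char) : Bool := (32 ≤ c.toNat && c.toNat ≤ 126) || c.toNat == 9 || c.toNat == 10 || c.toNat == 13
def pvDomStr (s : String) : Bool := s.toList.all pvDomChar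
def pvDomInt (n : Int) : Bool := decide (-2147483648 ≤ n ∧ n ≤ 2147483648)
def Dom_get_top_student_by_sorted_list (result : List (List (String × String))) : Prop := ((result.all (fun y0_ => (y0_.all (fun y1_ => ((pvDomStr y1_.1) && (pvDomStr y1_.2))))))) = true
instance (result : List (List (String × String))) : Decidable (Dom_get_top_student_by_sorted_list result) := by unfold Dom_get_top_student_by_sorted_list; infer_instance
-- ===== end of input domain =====

-- B replaces A's membership-guarded single pass with a guard-free loop that records the head's
-- course and filters all later entries of that course out of the remaining work (objective: alternative).

-- ===== PORT A =====
-- A's loop: for dictionary in result: if course in res.keys(): continue else res[course] = name.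
-- d["k"] is ported as Dict.getD ⟨d⟩ "k" ""; Pre_ excludes exactly the inputs where Python raises KeyError.
def get_top_student_by_sorted_list (result : List (List (String × String))) : List (String × String) :=
  (result.foldl
    (fun res d =>
      if res.contains (PySem.Dict.getD (PySem.Dict.mk d) "course" "") then res
      else res.insert (PySem.Dict.getD (PySem.Dict.mk d) "course" "")
                      (PySem.Dict.getD (PySem.Dict.mk d) "name" ""))
    PySem.Dict.empty).items

-- ===== PORT B =====
-- B's while loop over `pending`, one step per iteration, pending shrinks strictly.
def pvAltLoop (res : PySem.Dict String String) :
    List (List (String × String)) → PySem.Dict String String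
  | [] => res
  | top :: rest =>
      let course := PySem.Dict.getD (PySem.Dict.mk top) "course" ""
      pvAltLoop (res.insert course (PySem.Dict.getD (PySem.Dict.mk top) "name" ""))
        (rest.filter (fun d => PySem.Dict.getD (PySem.Dict.mk d) "course" "" != course))
  termination_by l => l.length
  decreasing_by
    simpa using Nat.lt_succ_of_le (List.length_filter_le _ _)

def get_top_student_by_sorted_list_alt (result : List (List (String × String))) : List (String × String) :=
  (pvAltLoop PySem.Dict.empty result).items

-- ===== PRECONDITION & SPEC =====
-- Pre_ excludes exactly the inputs on which the Python A raises KeyError: an inner dict without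
-- the key "course", or a dict whose course is seen for the first time but which lacks "name".
def Pre_get_top_student_by_sorted_list (result : List (List (String × String))) : Prop :=
  ∀ i : Nat, (h : i < result.length) →
    (PySem.Dict.contains (PySem.Dict.mk result[i]) "course" = true ∧
      (((result.take i).all (fun e =>
          PySem.Dict.getD (PySem.Dict.mk e) "course" "" !=
            PySem.Dict.getD (PySem.Dict.mk result[i]) "course" "")) = true →
        PySem.Dict.contains (PySem.Dict.mk result[i]) "name" = true))
instance (result : List (List (String × String))) : Decidable (Pre_get_top_student_by_sorted_list result) := by unfold Pre_get_top_student_by_sorted_list; infer_instance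

def pvWitness_get_top_student_by_sorted_list : (List (List (String × String))) :=
  [[("course", "math"), ("name", "ann")], [("course", "math"), ("name", "bob")]]

def Spec_get_top_student_by_sorted_list (result : List (List (String × String))) (out : List (String × String)) : Prop := out = get_top_student_by_sorted_list_alt result
instance (result : List (List (String × String))) (out : List (String × String)) : Decidable (Spec_get_top_student_by_sorted_list result out) := by unfold Spec_get_top_student_by_sorted_list; infer_instance

-- ===== CLAIM (what is proved, stated in full; the proofs are below) =====
def Claim_equal_get_top_student_by_sorted_list : Prop := ∀ (result : List (List (String × String))), Dom_get_top_student_by_sorted_list result → Pre_get_top_student_by_sorted_list result → Spec_get_top_student_by_sorted_list result (get_top_student_by_sorted_list result)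

-- ===== LEMMAS AND PROOFS =====

-- A's guarded fold equals B's filter loop, once the entries whose course is already in `res`
-- (which A would skip) are filtered away up front.
theorem pvFold_eq_altLoop (t : List (List (String × String)))
    (res : PySem.Dict String String) :
    t.foldl
      (fun res d =>
        if res.contains (PySem.Dict.getD (PySem.Dict.mk d) "course" "") then res
        else res.insert (PySem.Dict.getD (PySem.Dict.mk d) "course" "")
                        (PySem.Dict.getD (PySem.Dict.mk d) "name" "")) res
      = pvAltLoop res
          (t.filter (fun d => !res.contains (PySem.Dict.getD (PySem.Dict.mk d) "course" ""))) := by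
  induction t generalizing res with
  | nil => simp [pvAltLoop]
  | cons d t ih =>
      by_cases hc : res.contains (PySem.Dict.getD (PySem.Dict.mk d) "course" "") = true
      · simp only [List.foldl_cons, List.filter_cons, hc, Bool.not_true,
          Bool.false_eq_true, if_false]
        exact ih res
      · have hc' : res.contains (PySem.Dict.getD (PySem.Dict.mk d) "course" "") = false := by
          simpa using hc
        simp only [List.foldl_cons, List.filter_cons, hc', Bool.not_false, if_true]
        rw [ih]
        rw [pvAltLoop]
        congr 1
        rw [List.filter_filter]
        apply List.filter_congr
        intro e _
        simp [PySem.Dict.contains_insert, bne]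

-- ===== VERDICT (by name: the statement is the Claim_ definition above) =====
theorem get_top_student_by_sorted_list_spec : Claim_equal_get_top_student_by_sorted_list := by
  intro result _ _
  unfold Spec_get_top_student_by_sorted_list
  unfold get_top_student_by_sorted_list get_top_student_by_sorted_list_alt
  rw [pvFold_eq_altLoop]
  simp [PySem.Dict.contains_empty]
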